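-- pv_equiv track=rewrite | github.com/stupidcomputer/demographic-manager-sanitized | main.py | aggregate_demographic_totals
-- ===== SOURCE A (Python) =====
-- def aggregate_demographic_totals(payload, adultonly, childonly, internonly, withoutinterns):
--     results = {"age": {}, "gender": {}, "ethnicity": {}, "race": {}}
--
--     for i in payload:
--         if adultonly and not i["age"] == "a":
--             continue
--
--         if childonly and not i["age"] == "c":
--             continue
--
--         if internonly and not i["age"] == "i":
--             continue
--
--         if withoutinterns and i["age"] == "i":
--             continue
--
--         # for every entry we get
--         for key in results.keys():
--             # for every field we have
--             results[key].setdefault(i[key], 0)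
--             results[key][i[key]] += 1
--
--     return results
-- ===== SOURCE B (Python) =====
-- def aggregate_demographic_totals(payload, adultonly, childonly, internonly, withoutinterns):
--     def keep(e):
--         if adultonly and e["age"] != "a":
--             return False
--         if childonly and e["age"] != "c":
--             return False
--         if internonly and e["age"] != "i":
--             return False
--         if withoutinterns and e["age"] == "i":
--             return False
--         return True
--
--     kept = [e for e in payload if keep(e)]
--
--     results = {}
--     for field in ("age", "gender", "ethnicity", "race"):
--         vals = [e[field] for e in kept]
--         results[field] = {v: vals.count(v) for v in dict.fromkeys(vals)}
--     return results
-- ===== Notes on version B (the rewrite author's own statement) =====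
-- stated objective: idiomatic
-- what changed: A's single interleaved pass (age-filter continues plus an inner loop over the four result keys updating nested dicts per entry) is replaced by first materializing the filtered entry list, then computing each field's tally independently as a dedup-then-count dict comprehension over that list.
import Mathlib
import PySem

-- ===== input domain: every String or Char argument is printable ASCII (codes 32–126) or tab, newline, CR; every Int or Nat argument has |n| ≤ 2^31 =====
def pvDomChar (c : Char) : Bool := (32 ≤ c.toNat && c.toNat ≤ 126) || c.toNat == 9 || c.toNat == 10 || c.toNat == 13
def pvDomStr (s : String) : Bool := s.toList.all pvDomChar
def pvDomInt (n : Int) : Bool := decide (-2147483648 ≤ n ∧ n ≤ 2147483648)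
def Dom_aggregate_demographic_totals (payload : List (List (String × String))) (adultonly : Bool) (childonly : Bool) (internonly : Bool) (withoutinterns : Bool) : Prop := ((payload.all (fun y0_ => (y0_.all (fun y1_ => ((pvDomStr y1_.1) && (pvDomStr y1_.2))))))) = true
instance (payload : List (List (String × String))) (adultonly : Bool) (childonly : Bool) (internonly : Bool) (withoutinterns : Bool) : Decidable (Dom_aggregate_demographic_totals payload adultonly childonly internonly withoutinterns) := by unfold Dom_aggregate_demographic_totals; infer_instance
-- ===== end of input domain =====

-- B replaces A's single interleaved pass (filter `continue`s plus an inner loop over the four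
-- result keys updating nested dicts) by a filter-then-per-field tally: idiomatic, not faster.

-- ===== PORT A =====
-- d[k] for an entry dict (shared by both ports); under Pre_ the key is always present, so the "" default is never used
def pvAField (e : List (String × String)) (k : String) : String :=
  ((PySem.Dict.mk e).get? k).getD ""

def aggregate_demographic_totals (payload : List (List (String × String))) (adultonly : Bool) (childonly : Bool) (internonly : Bool) (withoutinterns : Bool) : List (String × List (String × Int)) :=
  let results : PySem.Dict String (PySem.Dict String Int) :=
    PySem.Dict.mk [("age", PySem.Dict.empty), ("gender", PySem.Dict.empty),
                   ("ethnicity", PySem.Dict.empty), ("race", PySem.Dict.empty)]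
  let final := payload.foldl (fun results i =>
    if adultonly && !(pvAField i "age" == "a") then results
    else if childonly && !(pvAField i "age" == "c") then results
    else if internonly && !(pvAField i "age" == "i") then results
    else if withoutinterns && (pvAField i "age" == "i") then results
    else
      -- for key in results.keys(): results[key].setdefault(i[key], 0); results[key][i[key]] += 1
      results.keys.foldl (fun results key =>
        results.insert key
          ((((results.get? key).getD PySem.Dict.empty).setdefault (pvAField i key) 0).modify
            (pvAField i key) 0 (· + 1))) results) results
  final.items.map (fun p => (p.1, p.2.items))

-- ===== PORT B =====
-- the `keep` predicate of Source B
def pvBKeep (adultonly childonly internonly withoutinterns : Bool) (e : List (String × String)) : Bool :=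
  if adultonly && !(pvAField e "age" == "a") then false
  else if childonly && !(pvAField e "age" == "c") then false
  else if internonly && !(pvAField e "age" == "i") then false
  else if withoutinterns && (pvAField e "age" == "i") then false
  else true

def aggregate_demographic_totals_alt (payload : List (List (String × String))) (adultonly : Bool) (childonly : Bool) (internonly : Bool) (withoutinterns : Bool) : List (String × List (String × Int)) :=
  let kept := payload.filter (pvBKeep adultonly childonly internonly withoutinterns)
  ["age", "gender", "ethnicity", "race"].map (fun field =>
    let vals := kept.map (fun e => pvAField e field)
    (field, (PySem.List.dedup vals).map (fun v => (v, (vals.count v : Int)))))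

-- ===== PRECONDITION & SPEC =====
-- Pre_ excludes exactly the inputs on which A raises KeyError: every entry must carry the "age"
-- key, and every entry that survives the age filter must also carry "gender"/"ethnicity"/"race".
def Pre_aggregate_demographic_totals (payload : List (List (String × String))) (adultonly : Bool) (childonly : Bool) (internonly : Bool) (withoutinterns : Bool) : Prop :=
  ∀ e ∈ payload, (PySem.Dict.mk e).contains "age" = true ∧
    (((adultonly = true → ((PySem.Dict.mk e).get? "age").getD "" = "a") ∧
      (childonly = true → ((PySem.Dict.mk e).get? "age").getD "" = "c") ∧
      (internonly = true → ((PySem.Dict.mk e).get? "age").getD "" = "i") ∧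
      (withoutinterns = true → ((PySem.Dict.mk e).get? "age").getD "" ≠ "i")) →
     (PySem.Dict.mk e).contains "gender" = true ∧
     (PySem.Dict.mk e).contains "ethnicity" = true ∧
     (PySem.Dict.mk e).contains "race" = true)
instance (payload : List (List (String × String))) (adultonly : Bool) (childonly : Bool) (internonly : Bool) (withoutinterns : Bool) : Decidable (Pre_aggregate_demographic_totals payload adultonly childonly internonly withoutinterns) := by unfold Pre_aggregate_demographic_totals; infer_instance

def pvWitness_aggregate_demographic_totals : (List (List (String × String))) × Bool × Bool × Bool × Bool :=
  ([[("age", "a"), ("gender", "m"), ("ethnicity", "h"), ("race", "w")],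
    [("age", "c"), ("gender", "f"), ("ethnicity", "h"), ("race", "w")]], false, false, false, false)

def Spec_aggregate_demographic_totals (payload : List (List (String × String))) (adultonly : Bool) (childonly : Bool) (internonly : Bool) (withoutinterns : Bool) (out : List (String × List (String × Int))) : Prop := out = aggregate_demographic_totals_alt payload adultonly childonly internonly withoutinterns
instance (payload : List (List (String × String))) (adultonly : Bool) (childonly : Bool) (internonly : Bool) (withoutinterns : Bool) (out : List (String × List (String × Int))) : Decidable (Spec_aggregate_demographic_totals payload adultonly childonly internonly withoutinterns out) := by unfold Spec_aggregate_demographic_totals; infer_instance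

-- ===== CLAIM (what is proved, stated in full; the proofs are below) =====
def Claim_equal_aggregate_demographic_totals : Prop := ∀ (payload : List (List (String × String))) (adultonly : Bool) (childonly : Bool) (internonly : Bool) (withoutinterns : Bool), Dom_aggregate_demographic_totals payload adultonly childonly internonly withoutinterns → Pre_aggregate_demographic_totals payload adultonly childonly internonly withoutinterns → Spec_aggregate_demographic_totals payload adultonly childonly internonly withoutinterns (aggregate_demographic_totals payload adultonly childonly internonly withoutinterns)

-- ===== LEMMAS AND PROOFS =====

-- proof-only abbreviations for A's loop body
def pvQuad (da dg de dr : PySem.Dict String Int) : PySem.Dict String (PySem.Dict String Int) :=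
  PySem.Dict.mk [("age", da), ("gender", dg), ("ethnicity", de), ("race", dr)]

def pvUpdA (r : PySem.Dict String (PySem.Dict String Int)) (i : List (String × String)) :
    PySem.Dict String (PySem.Dict String Int) :=
  r.keys.foldl (fun r key =>
    r.insert key
      ((((r.get? key).getD PySem.Dict.empty).setdefault (pvAField i key) 0).modify
        (pvAField i key) 0 (· + 1))) r

def pvStp (d : PySem.Dict String Int) (v : String) : PySem.Dict String Int :=
  (d.setdefault v 0).modify v 0 (· + 1)

theorem pv_setdefault_modify (d : PySem.Dict String Int) (v : String) (f : Int → Int) :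
    (d.setdefault v 0).modify v 0 f = d.modify v 0 f := by
  by_cases h : d.contains v = true
  · rw [PySem.Dict.setdefault_of_contains d 0 h]
  · rw [PySem.Dict.setdefault_of_not_contains d 0 (by simpa using h)]
    simp [PySem.Dict.modify, PySem.Dict.getD_insert_self, PySem.Dict.insert_insert_self,
      PySem.Dict.getD_of_not_contains d 0 (by simpa using h)]

theorem pv_upd_quad (da dg de dr : PySem.Dict String Int) (i : List (String × String)) :
    pvUpdA (pvQuad da dg de dr) i =
      pvQuad (pvStp da (pvAField i "age")) (pvStp dg (pvAField i "gender"))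
             (pvStp de (pvAField i "ethnicity")) (pvStp dr (pvAField i "race")) := by
  simp [pvUpdA, pvQuad, pvStp, PySem.Dict.keys, List.foldl,
    PySem.Dict.insert, PySem.Dict.get?, PySem.Dict.contains]

theorem pv_fold_quad (l : List (List (String × String))) (da dg de dr : PySem.Dict String Int) :
    l.foldl pvUpdA (pvQuad da dg de dr) =
      pvQuad (l.foldl (fun d e => pvStp d (pvAField e "age")) da)
             (l.foldl (fun d e => pvStp d (pvAField e "gender")) dg)
             (l.foldl (fun d e => pvStp d (pvAField e "ethnicity")) de)
             (l.foldl (fun d e => pvStp d (pvAField e "race")) dr) := by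
  induction l generalizing da dg de dr with
  | nil => rfl
  | cons h t ih => simp [List.foldl, pv_upd_quad, ih]

theorem pv_tally_counter (l : List (List (String × String))) (f : String) :
    l.foldl (fun d e => pvStp d (pvAField e f)) PySem.Dict.empty =
      PySem.Dict.counter (l.map (fun e => pvAField e f)) := by
  rw [PySem.Dict.counter_eq_foldl, List.foldl_map]
  simp only [pvStp, pv_setdefault_modify]

-- ===== VERDICT (by name: the statement is the Claim_ definition above) =====
theorem aggregate_demographic_totals_spec : Claim_equal_aggregate_demographic_totals := by
  intro payload adultonly childonly internonly withoutinterns _hdom _hpre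
  unfold Spec_aggregate_demographic_totals
  unfold aggregate_demographic_totals aggregate_demographic_totals_alt
  have hstep : (fun (r : PySem.Dict String (PySem.Dict String Int)) i =>
      if adultonly && !(pvAField i "age" == "a") then r
      else if childonly && !(pvAField i "age" == "c") then r
      else if internonly && !(pvAField i "age" == "i") then r
      else if withoutinterns && (pvAField i "age" == "i") then r
      else pvUpdA r i) =
      (fun r i => if pvBKeep adultonly childonly internonly withoutinterns i then pvUpdA r i else r) := by
    funext r i
    simp only [pvBKeep, pvAField, pvAField]
    split_ifs <;> first | rfl | contradiction
  dsimp only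
  rw [show (PySem.Dict.mk [("age", PySem.Dict.empty), ("gender", PySem.Dict.empty),
        ("ethnicity", PySem.Dict.empty), ("race", PySem.Dict.empty)]) =
      pvQuad PySem.Dict.empty PySem.Dict.empty PySem.Dict.empty PySem.Dict.empty from rfl]
  rw [show (fun (results : PySem.Dict String (PySem.Dict String Int)) i =>
      if adultonly && !(pvAField i "age" == "a") then results
      else if childonly && !(pvAField i "age" == "c") then results
      else if internonly && !(pvAField i "age" == "i") then results
      else if withoutinterns && (pvAField i "age" == "i") then results
      else results.keys.foldl (fun results key =>
        results.insert key
          ((((results.get? key).getD PySem.Dict.empty).setdefault (pvAField i key) 0).modify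
            (pvAField i key) 0 (· + 1))) results) =
      (fun r i => if pvBKeep adultonly childonly internonly withoutinterns i then pvUpdA r i else r)
    from hstep]
  rw [PySem.List.foldl_if_eq_foldl_filter, pv_fold_quad]
  simp only [pv_tally_counter, pvQuad, PySem.Dict.items_counter,
    PySem.List.dedup_eq_ofList, List.map]
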